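-- pv_equiv track=rewrite | github.com/Pierrafrom/Advent-Of-Code-2022 | DAY-3/main.py | chercheCommun
-- ===== SOURCE A (Python) =====
-- def chercheCommun(listeDeLigne):
--     ligne1 = listeDeLigne[0]
--     ligne2 = listeDeLigne[1]
--     mot = ''
--     i = 0
--     j = 0
--     for i in ligne1:
--         for j in ligne2:
--             if i == j:
--                 mot = i
--     return mot
-- ===== SOURCE B (Python) =====
-- def chercheCommun(listeDeLigne):
--     ligne1 = listeDeLigne[0]
--     ligne2 = listeDeLigne[1]
--     set2 = set(ligne2)
--     for c in reversed(ligne1):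
--         if c in set2:
--             return c
--     return ''
-- ===== Notes on version B (the rewrite author's own statement) =====
-- stated objective: alternative
-- what changed: Replaces the nested overwrite loops (scan ligne1, rescanning ligne2 for each char) with a set-membership reverse scan: build set(ligne2) once, walk ligne1 backwards and return the first char found in the set.
import Mathlib
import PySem

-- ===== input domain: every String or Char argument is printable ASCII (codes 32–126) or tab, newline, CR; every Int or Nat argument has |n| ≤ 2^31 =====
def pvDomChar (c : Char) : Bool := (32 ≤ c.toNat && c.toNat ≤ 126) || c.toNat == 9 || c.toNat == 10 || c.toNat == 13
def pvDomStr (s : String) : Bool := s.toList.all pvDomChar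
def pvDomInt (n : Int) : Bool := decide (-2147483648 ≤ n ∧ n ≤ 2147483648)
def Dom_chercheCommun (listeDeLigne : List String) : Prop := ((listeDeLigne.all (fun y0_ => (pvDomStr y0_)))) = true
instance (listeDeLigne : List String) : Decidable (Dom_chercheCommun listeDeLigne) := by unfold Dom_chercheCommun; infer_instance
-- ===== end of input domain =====

-- B builds set(ligne2) once and scans ligne1 backwards, returning the first hit,
-- instead of A's nested loops that overwrite a tracker (objective: alternative decomposition).

-- ===== PORT A =====
def chercheCommun (listeDeLigne : List String) : String :=
  match PySem.List.pyGet? listeDeLigne 0, PySem.List.pyGet? listeDeLigne 1 with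
  | some ligne1, some ligne2 =>
      ligne1.toList.foldl (fun mot i =>
        ligne2.toList.foldl (fun mot j => if i == j then String.ofList [i] else mot) mot) ""
  | _, _ => ""   -- unreachable under Pre_: Python raises IndexError

-- ===== PORT B =====
def chercheCommun_alt (listeDeLigne : List String) : String :=
  (((PySem.List.pyGet? listeDeLigne 0).bind fun ligne1 =>
    (PySem.List.pyGet? listeDeLigne 1).map fun ligne2 =>
      let set2 : PySem.Set Char := PySem.Set.ofList ligne2.toList
      ((ligne1.toList.reverse.find? (fun c => PySem.Set.contains set2 c)).map
        (fun c => String.ofList [c])).getD "")).getD ""   -- none = IndexError, unreachable under Pre_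

-- ===== PRECONDITION & SPEC =====
-- Python A raises IndexError when the list has fewer than two elements.
def Pre_chercheCommun (listeDeLigne : List String) : Prop := 2 ≤ listeDeLigne.length
instance (listeDeLigne : List String) : Decidable (Pre_chercheCommun listeDeLigne) := by unfold Pre_chercheCommun; infer_instance
def pvWitness_chercheCommun : List String := ["vJrwpWtwJgWr", "hcsFMMfFFhFp"]

def Spec_chercheCommun (listeDeLigne : List String) (out : String) : Prop := out = chercheCommun_alt listeDeLigne
instance (listeDeLigne : List String) (out : String) : Decidable (Spec_chercheCommun listeDeLigne out) := by unfold Spec_chercheCommun; infer_instance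

-- ===== CLAIM (what is proved, stated in full; the proofs are below) =====
def Claim_equal_chercheCommun : Prop := ∀ (listeDeLigne : List String), Dom_chercheCommun listeDeLigne → Pre_chercheCommun listeDeLigne → Spec_chercheCommun listeDeLigne (chercheCommun listeDeLigne)

-- ===== LEMMAS AND PROOFS =====

-- A's inner loop over ligne2 just records whether the current char occurs in ligne2.
theorem inner_loop_eq (c : Char) (m : String) (l2 : List Char) :
    l2.foldl (fun mot j => if c == j then String.ofList [c] else mot) m
      = if c ∈ l2 then String.ofList [c] else m := by
  induction l2 generalizing m with
  | nil => simp
  | cons d t ih =>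
    simp only [List.foldl_cons, List.mem_cons]
    by_cases h : c = d
    · subst h
      rw [if_pos (by simp), ih]
      simp
    · rw [if_neg (by simp [h]), ih]
      simp [h]

-- Collapsing the inner loop turns A's nested folds into a single membership fold.
theorem nested_eq_single (l2 : List Char) (l1 : List Char) (m : String) :
    l1.foldl (fun mot i =>
        l2.foldl (fun mot j => if i == j then String.ofList [i] else mot) mot) m
      = l1.foldl (fun mot i => if i ∈ l2 then String.ofList [i] else mot) m := by
  induction l1 generalizing m with
  | nil => rfl
  | cons c t ih =>
    simp only [List.foldl_cons]
    rw [inner_loop_eq, ih]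

-- A's outer loop (last overwrite wins) equals a reverse scan for the first hit.
theorem outer_loop_eq (l2 : List Char) (l1 : List Char) :
    l1.foldl (fun mot i => if i ∈ l2 then String.ofList [i] else mot) ""
      = match l1.reverse.find? (fun c => decide (c ∈ l2)) with
        | some c => String.ofList [c]
        | none => "" := by
  induction l1 using List.reverseRecOn with
  | nil => simp
  | append_singleton t c ih =>
    rw [List.foldl_append, List.reverse_append]
    simp only [List.foldl_cons, List.foldl_nil, List.reverse_singleton,
      List.singleton_append, List.find?_cons]
    by_cases h : c ∈ l2
    · simp [h]
    · simp only [h, decide_false, if_false]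
      exact ih

-- ===== VERDICT =====
theorem chercheCommun_spec : Claim_equal_chercheCommun := by
  intro l _ hpre
  unfold Spec_chercheCommun
  match l, hpre with
  | l1 :: l2 :: rest, _ =>
    have e1 : PySem.List.pyGet? (l1 :: l2 :: rest) 0 = some l1 := by
      have h0 : (0:Int) ≤ (rest.length:Int) + 1 := by positivity
      simp [PySem.List.pyGet?, PySem.List.pyIdx?, h0]
    have e2 : PySem.List.pyGet? (l1 :: l2 :: rest) 1 = some l2 := by
      simp [PySem.List.pyGet?, PySem.List.pyIdx?]
    have hpred : (fun c => PySem.Set.contains (PySem.Set.ofList l2.toList) c)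
        = (fun c => decide (c ∈ l2.toList)) := by
      funext c
      simp [PySem.Set.contains_eq_listContains, PySem.Set.mem_ofList]
    simp only [chercheCommun, chercheCommun_alt, e1, e2, hpred, Option.bind_some,
      Option.map_some, Option.getD_some]
    rw [nested_eq_single, outer_loop_eq]
    cases h : l1.toList.reverse.find? (fun c => decide (c ∈ l2.toList)) <;> simp
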